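-- pv_equiv track=rewrite | github.com/MElkmeshi/CSC340 | lab2.py | Q9
-- ===== SOURCE A (Python) =====
-- def Q9(dictt:dict):
--     min_value = len(dictt[next(iter(dictt))])
--     for value in dictt:
--         if len(dictt[value]) < min_value:
--             min_value = len(dictt[value])
--     result =[]
--     for k,v in dictt.items():
--         if len(v) == (min_value):
--             result.append(k)
--     return result
-- ===== SOURCE B (Python) =====
-- def Q9(dictt: dict):
--     it = iter(dictt.items())
--     k0, v0 = next(it)  # empty dict: StopIteration, same as A
--     best = len(v0)
--     result = [k0]
--     for k, v in it:
--         n = len(v)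
--         if n < best:
--             best = n
--             result = [k]
--         elif n == best:
--             result.append(k)
--     return result
-- ===== Notes on version B (the rewrite author's own statement) =====
-- stated objective: alternative
-- what changed: Single pass over items() maintaining both the running minimum length and the current list of minimal keys (reset on strictly smaller, append on equal), instead of A's two passes where the first pass re-looks every key up in the dict.
import Mathlib
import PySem

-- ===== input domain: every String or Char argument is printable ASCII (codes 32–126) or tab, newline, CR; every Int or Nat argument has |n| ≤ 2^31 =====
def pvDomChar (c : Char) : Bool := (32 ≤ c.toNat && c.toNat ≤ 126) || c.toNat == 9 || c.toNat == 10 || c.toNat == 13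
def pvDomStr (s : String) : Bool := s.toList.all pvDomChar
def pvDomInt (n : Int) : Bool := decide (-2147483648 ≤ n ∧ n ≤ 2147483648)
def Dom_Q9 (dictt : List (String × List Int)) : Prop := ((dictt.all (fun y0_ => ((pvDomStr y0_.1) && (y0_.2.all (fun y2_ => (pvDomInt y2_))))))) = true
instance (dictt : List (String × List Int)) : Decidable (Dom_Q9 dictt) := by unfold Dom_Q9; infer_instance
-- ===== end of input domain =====

-- B replaces A's two passes (min pass with a dict lookup per key, then a collect pass)
-- by a single pass over the items maintaining the running minimum and the minimal keys.


-- ===== PORT A =====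
-- dictt[k]: Python dict lookup = first matching key of the association list
def pyLookup (dictt : List (String × List Int)) (k : String) : List Int :=
  ((dictt.find? (fun kv => kv.1 == k)).map (·.2)).getD []

def Q9 (dictt : List (String × List Int)) : List String :=
  match dictt with
  | [] => []        -- unreachable under Pre_Q9: Python raises StopIteration here
  | (k0, _) :: _ =>
    -- min_value = len(dictt[next(iter(dictt))]); then the min loop over the keys
    let mv : Nat := dictt.foldl
      (fun m kv => if (pyLookup dictt kv.1).length < m then (pyLookup dictt kv.1).length else m)
      (pyLookup dictt k0).length
    -- result loop over items()
    dictt.foldl (fun r kv => if kv.2.length = mv then r ++ [kv.1] else r) []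

-- ===== PORT B =====
def Q9altStep (st : Nat × List String) (kv : String × List Int) : Nat × List String :=
  if kv.2.length < st.1 then (kv.2.length, [kv.1])
  else if kv.2.length = st.1 then (st.1, st.2 ++ [kv.1])
  else st

def Q9_alt (dictt : List (String × List Int)) : List String :=
  match dictt with
  | [] => []        -- unreachable under Pre_Q9: Python raises StopIteration here
  | (k0, v0) :: rest => (rest.foldl Q9altStep (v0.length, [k0])).2

-- ===== PRECONDITION & SPEC =====
-- Pre_ excludes the empty dict (A raises StopIteration there) and association lists with
-- duplicate keys, which cannot arise from a Python dict and on which A's first-match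
-- lookup semantics is an artefact of the list representation.
def Pre_Q9 (dictt : List (String × List Int)) : Prop :=
  dictt ≠ [] ∧ (dictt.map Prod.fst).Nodup
instance (dictt : List (String × List Int)) : Decidable (Pre_Q9 dictt) := by unfold Pre_Q9; infer_instance

def pvWitness_Q9 : (List (String × List Int)) := [("a", [1, 2]), ("b", [3]), ("c", [4])]

def Spec_Q9 (dictt : List (String × List Int)) (out : List String) : Prop := out = Q9_alt dictt
instance (dictt : List (String × List Int)) (out : List String) : Decidable (Spec_Q9 dictt out) := by unfold Spec_Q9; infer_instance

-- ===== CLAIM (what is proved, stated in full; the proofs are below) =====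
def Claim_equal_Q9 : Prop := ∀ (dictt : List (String × List Int)), Dom_Q9 dictt → Pre_Q9 dictt → Spec_Q9 dictt (Q9 dictt)

-- ===== LEMMAS AND PROOFS =====

-- with nodup keys, looking a key of the list up returns its own value
theorem pyLookup_mem {dictt : List (String × List Int)} (hnd : (dictt.map Prod.fst).Nodup)
    {kv : String × List Int} (h : kv ∈ dictt) : pyLookup dictt kv.1 = kv.2 := by
  induction dictt with
  | nil => cases h
  | cons hd tl ih =>
    simp only [List.map_cons, List.nodup_cons] at hnd
    rcases List.mem_cons.mp h with h | h
    · subst h; simp [pyLookup]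
    · have hne : (hd.1 == kv.1) = false := by
        rw [beq_eq_false_iff_ne]
        intro he; exact hnd.1 (he ▸ List.mem_map_of_mem h)
      simpa [pyLookup, List.find?_cons, hne] using ih hnd.2 h

theorem foldl_min_eq {α : Type} (f : α → Nat) (l : List α) (m : Nat) :
    l.foldl (fun a x => if f x < a then f x else a) m = l.foldl (fun a x => min (f x) a) m := by
  induction l generalizing m with
  | nil => rfl
  | cons x t ih =>
    have h : (if f x < m then f x else m) = min (f x) m := by split_ifs with h <;> omega
    rw [List.foldl_cons, List.foldl_cons, h, ih]

theorem foldl_min_le {α : Type} (f : α → Nat) (l : List α) (m : Nat) :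
    l.foldl (fun a x => min (f x) a) m ≤ m := by
  induction l generalizing m with
  | nil => exact le_rfl
  | cons x t ih => exact le_trans (ih _) (min_le_right _ _)

-- characterisation of B's single-pass fold
theorem q9alt_fold (l : List (String × List Int)) (m : Nat) (r : List String) :
    l.foldl Q9altStep (m, r)
      = (l.foldl (fun a kv => min kv.2.length a) m,
         (if l.foldl (fun a kv => min kv.2.length a) m = m then r else [])
           ++ (l.filter (fun kv => kv.2.length = l.foldl (fun a kv => min kv.2.length a) m)).map Prod.fst) := by
  induction l generalizing m r with
  | nil => simp
  | cons kv t ih =>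
    have hM := foldl_min_le (fun kv : String × List Int => kv.2.length) t
    simp only [List.foldl_cons, List.filter_cons]
    by_cases h1 : kv.2.length < m
    · have hmin : min kv.2.length m = kv.2.length := by omega
      rw [show Q9altStep (m, r) kv = (kv.2.length, [kv.1]) by simp [Q9altStep, h1], ih]
      simp only [hmin]
      have hne : t.foldl (fun a kv => min kv.2.length a) kv.2.length ≠ m := by
        have := hM kv.2.length; omega
      by_cases h2 : t.foldl (fun a kv => min kv.2.length a) kv.2.length = kv.2.length
      · simp [h2, h1.ne]
      · have : ¬ kv.2.length = t.foldl (fun a kv => min kv.2.length a) kv.2.length := fun h => h2 h.symm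
        simp [h2, hne, this]
    · by_cases h2 : kv.2.length = m
      · have hmin : min kv.2.length m = m := by omega
        rw [show Q9altStep (m, r) kv = (m, r ++ [kv.1]) by simp [Q9altStep, h2], ih]
        simp only [hmin]
        by_cases h3 : t.foldl (fun a kv => min kv.2.length a) m = m
        · simp [h3, h2]
        · have : ¬ kv.2.length = t.foldl (fun a kv => min kv.2.length a) m := by
            have := hM m; omega
          simp [h3, this]
      · have hmin : min kv.2.length m = m := by omega
        rw [show Q9altStep (m, r) kv = (m, r) by simp [Q9altStep, h1, h2], ih]
        simp only [hmin]
        have : ¬ kv.2.length = t.foldl (fun a kv => min kv.2.length a) m := by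
          have := hM m; omega
        simp [this]

-- ===== VERDICT (by name: the statement is the Claim_ definition above) =====
theorem Q9_spec : Claim_equal_Q9 := by
  intro dictt _ hpre
  unfold Spec_Q9
  obtain ⟨hne, hnd⟩ := hpre
  match dictt, hne with
  | (k0, v0) :: rest, _ =>
    simp only [Q9, Q9_alt]
    have hlook : ∀ (m : Nat) (kv : String × List Int), kv ∈ (k0, v0) :: rest →
        (fun m kv => if (pyLookup ((k0, v0) :: rest) kv.1).length < m
            then (pyLookup ((k0, v0) :: rest) kv.1).length else m) m kv
          = (fun m (kv : String × List Int) => if kv.2.length < m then kv.2.length else m) m kv := by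
      intro m kv hmem
      simp only [pyLookup_mem hnd hmem]
    rw [PySem.List.foldl_congr_mem _ _ _ _ hlook]
    have h0 : pyLookup ((k0, v0) :: rest) k0 = v0 := pyLookup_mem hnd (List.mem_cons_self ..)
    rw [h0, foldl_min_eq (fun kv : String × List Int => kv.2.length),
        q9alt_fold]
    simp only [List.foldl_cons, min_self]
    set M := rest.foldl (fun a (kv : String × List Int) => min kv.2.length a) v0.length with hMdef
    rw [PySem.List.foldl_append_ite (fun kv : String × List Int => kv.2.length = M) Prod.fst]
    by_cases h : v0.length = M
    · rw [if_pos h, if_pos h.symm]; simp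
    · have h' : ¬ M = v0.length := fun he => h he.symm
      rw [if_neg h, if_neg h']
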